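-- pv_equiv track=rewrite | github.com/leejamesss/Computation-Basis-C | hw06/5.py | findLastChar
-- ===== SOURCE A (Python) =====
-- def findLastChar(str):
--     dic={}
--     for i in str:
--         if i in dic:
--             dic[i]+=1
--         else:
--             dic[i]=1
--     for i in str[::-1]:
--         if dic[i]==1:
--             return i
--     return 'no'
-- ===== SOURCE B (Python) =====
-- def findLastChar(str):
--     # One forward pass, no reverse scan and no frequency table at the end:
--     # keep the characters seen exactly once so far (in occurrence order) and
--     # the set of characters already seen twice or more; the answer is the
--     # last surviving unique character.
--     uniq = []
--     dup = set()
--     for ch in str: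
--         if ch in dup:
--             continue
--         if ch in uniq:
--             uniq.remove(ch)
--             dup.add(ch)
--         else:
--             uniq.append(ch)
--     return uniq[-1] if uniq else 'no'
-- ===== Notes on version B (the rewrite author's own statement) =====
-- stated objective: alternative
-- what changed: B replaces A's two staged passes (build a frequency dict, then reverse-scan the string querying it) with a single forward pass maintaining an ordered list of still-unique characters and a set of duplicates, returning the last surviving unique character; no reverse traversal and no counting table remain.
import Mathlib
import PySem

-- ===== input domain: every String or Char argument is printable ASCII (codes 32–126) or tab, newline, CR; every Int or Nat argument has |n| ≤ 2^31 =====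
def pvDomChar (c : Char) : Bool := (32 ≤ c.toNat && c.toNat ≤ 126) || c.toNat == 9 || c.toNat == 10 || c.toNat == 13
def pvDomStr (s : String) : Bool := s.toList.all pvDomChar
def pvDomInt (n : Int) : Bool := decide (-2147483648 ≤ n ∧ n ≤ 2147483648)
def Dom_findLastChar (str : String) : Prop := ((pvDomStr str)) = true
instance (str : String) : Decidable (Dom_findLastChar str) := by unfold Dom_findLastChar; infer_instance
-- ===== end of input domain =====

-- B replaces A's two passes (count dictionary, then reverse scan) by a single forward
-- pass tracking the still-unique characters in order; alternative algorithm, not faster.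

-- ===== PORT A =====
-- first loop of A: build the frequency dictionary
def findLastCharDic (str : String) : PySem.Dict Char Int :=
  str.toList.foldl
    (fun d i => if d.contains i then d.modify i 0 (· + 1) else d.insert i 1)
    PySem.Dict.empty

-- second loop of A: scan str[::-1], return the first char whose stored count is 1
def findLastCharScanA (d : PySem.Dict Char Int) : List Char → String
  | [] => "no"
  | i :: rest => if d.getD i 0 == 1 then String.ofList [i] else findLastCharScanA d rest

def findLastChar (str : String) : String :=
  findLastCharScanA (findLastCharDic str) str.toList.reverse

-- ===== PORT B =====
-- B's loop body: skip duplicates; demote a repeated unique to dup; else append as unique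
def findLastCharStep (s : List Char × PySem.Set Char) (ch : Char) :
    List Char × PySem.Set Char :=
  if PySem.Set.contains s.2 ch then s
  else if s.1.contains ch then (s.1.erase ch, PySem.Set.add s.2 ch)
  else (s.1 ++ [ch], s.2)

def findLastChar_alt (str : String) : String :=
  match (str.toList.foldl findLastCharStep ([], PySem.Set.empty)).1.getLast? with
  | some c => String.ofList [c]
  | none => "no"

-- ===== PRECONDITION & SPEC =====
def Spec_findLastChar (str : String) (out : String) : Prop := out = findLastChar_alt str
instance (str : String) (out : String) : Decidable (Spec_findLastChar str out) := by unfold Spec_findLastChar; infer_instance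

-- ===== CLAIM (what is proved, stated in full; the proofs are below) =====
def Claim_equal_findLastChar : Prop := ∀ (str : String), Dom_findLastChar str → Spec_findLastChar str (findLastChar str)

-- ===== LEMMAS AND PROOFS =====

-- A's contains/insert-or-modify loop stores exactly the occurrence counts.
theorem getD_findLastCharFold (l : List Char) (d : PySem.Dict Char Int) (v : Char) :
    (l.foldl (fun d i => if d.contains i then d.modify i 0 (· + 1) else d.insert i 1) d).getD v 0
      = d.getD v 0 + l.count v := by
  induction l generalizing d with
  | nil => simp
  | cons x xs ih =>
    simp only [List.foldl_cons, ih]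
    by_cases hc : d.contains x = true
    · rw [if_pos hc, PySem.Dict.getD_modify]
      by_cases hv : v = x
      · subst hv; simp; ring
      · simp [hv, Ne.symm hv]
    · rw [if_neg hc]
      by_cases hv : v = x
      · subst hv
        rw [PySem.Dict.getD_insert_self, PySem.Dict.getD_of_not_contains d 0 (by simpa using hc)]
        simp; ring
      · rw [PySem.Dict.getD_insert_of_ne]
        · simp [Ne.symm hv]
        · exact fun h => hv h

theorem dic_getD_eq_count (str : String) (v : Char) :
    (findLastCharDic str).getD v 0 = (str.toList.count v : Int) := by
  unfold findLastCharDic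
  rw [getD_findLastCharFold]
  simp

-- A's reverse scan returns the first scanned char with count 1, i.e. the head of the filter.
theorem scanA_eq_head_filter (str : String) (m : List Char) :
    findLastCharScanA (findLastCharDic str) m
      = match (m.filter (fun c => str.toList.count c == 1)).head? with
        | some c => String.ofList [c]
        | none => "no" := by
  induction m with
  | nil => rfl
  | cons c rest ih =>
    simp only [findLastCharScanA, dic_getD_eq_count, List.filter_cons]
    by_cases h : str.toList.count c = 1
    · simp [h]
    · have h1 : ((str.toList.count c : Int) == 1) = false := by simp; omega
      have h2 : (str.toList.count c == 1) = false := by simpa using h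
      rw [h1, h2, ih]
      simp

-- the count-1 filter of a list has no duplicates
theorem nodup_filter_count_one (l : List Char) :
    (l.filter (fun c => l.count c == 1)).Nodup := by
  rw [List.nodup_iff_count_le_one]
  intro a
  by_cases ha : a ∈ l.filter (fun c => l.count c == 1)
  · have h1 : l.count a = 1 := by have := List.of_mem_filter ha; simpa using this
    have hsub : (l.filter (fun c => l.count c == 1)).Sublist l := List.filter_sublist
    calc (l.filter (fun c => l.count c == 1)).count a
        ≤ l.count a := hsub.count_le a
      _ = 1 := h1
  · simp [List.count_eq_zero.mpr ha]

-- B's fold invariant: after processing l, the unique list is exactly the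
-- count-1 characters of l in order, and the dup set holds the count-≥2 characters.
theorem foldB_inv (l : List Char) :
    (l.foldl findLastCharStep ([], PySem.Set.empty)).1
        = l.filter (fun c => l.count c == 1)
    ∧ ∀ c : Char,
        (c ∈ (l.foldl findLastCharStep ([], PySem.Set.empty)).2 ↔ 2 ≤ l.count c) := by
  induction l using List.reverseRecOn with
  | nil => simp [PySem.Set.empty]
  | append_singleton l x ih =>
    obtain ⟨hu, hd⟩ := ih
    rw [List.foldl_append, List.foldl_cons, List.foldl_nil]
    set s := l.foldl findLastCharStep ([], PySem.Set.empty) with hs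
    have hcnt : ∀ c : Char, (l ++ [x]).count c = l.count c + (if c = x then 1 else 0) := by
      intro c
      by_cases hcx : c = x
      · simp [List.count_append, hcx]
      · simp [List.count_append, List.count_cons, hcx]
        exact fun h => hcx h.symm
    unfold findLastCharStep
    by_cases hdup : x ∈ s.2
    · -- x already a duplicate (count ≥ 2): state unchanged
      have hx2 : 2 ≤ l.count x := (hd x).mp hdup
      rw [if_pos (by simpa [PySem.Set.contains] using hdup)]
      refine ⟨?_, ?_⟩
      · rw [hu, List.filter_append]
        have hxf : ((l ++ [x]).count x == 1) = false := by
          rw [hcnt x]; simp; omega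
        have h1 : [x].filter (fun c => (l ++ [x]).count c == 1) = [] := by
          simp only [List.filter, hxf]
        rw [h1, List.append_nil]
        refine (List.filter_congr ?_).symm
        intro c hc
        by_cases hcx : c = x
        · subst hcx
          rw [hcnt c]; simp; omega
        · rw [hcnt c]; simp [hcx]
      · intro c
        rw [hd c, hcnt c]
        by_cases hcx : c = x
        · subst hcx
          simp only [iff_iff_implies_and_implies]
          omega
        · simp [hcx]
    · have hxle : l.count x ≤ 1 := by
        by_contra h
        exact hdup ((hd x).mpr (by omega))
      rw [if_neg (by simpa [PySem.Set.contains] using hdup)]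
      by_cases hmem : x ∈ s.1
      · -- x was unique so far (count = 1): demote it
        have hx1 : l.count x = 1 := by
          rw [hu] at hmem
          have := List.of_mem_filter hmem
          simpa using this
        rw [if_pos (by simpa using hmem)]
        refine ⟨?_, ?_⟩
        · -- erase x from the filter = filter of the extended list
          show s.1.erase x = _
          rw [hu, (nodup_filter_count_one l).erase_eq_filter, List.filter_filter]
          rw [List.filter_append]
          have hxf : ((l ++ [x]).count x == 1) = false := by
            rw [hcnt x]; simp; omega
          have h1 : [x].filter (fun c => (l ++ [x]).count c == 1) = [] := by
            simp only [List.filter, hxf]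
          rw [h1, List.append_nil]
          refine (List.filter_congr ?_).symm
          intro c hc
          by_cases hcx : c = x
          · subst hcx
            rw [hcnt c]; simp [hx1]
          · rw [hcnt c]; simp [hcx]
        · intro c
          show c ∈ PySem.Set.add s.2 x ↔ _
          rw [PySem.Set.mem_add, hd c, hcnt c]
          by_cases hcx : c = x
          · subst hcx; simp [hx1]
          · simp [hcx]
      · -- x never seen before (count = 0): append as unique
        have hx0 : l.count x = 0 := by
          by_contra h
          have hx1 : l.count x = 1 := by omega
          exact hmem (by
            rw [hu]
            exact List.mem_filter.mpr ⟨List.count_pos_iff.mp (by omega), by simp [hx1]⟩)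
        rw [if_neg (by simpa using hmem)]
        refine ⟨?_, ?_⟩
        · show s.1 ++ [x] = _
          rw [hu, List.filter_append]
          have hxf : ((l ++ [x]).count x == 1) = true := by
            rw [hcnt x]; simp; omega
          have h1 : [x].filter (fun c => (l ++ [x]).count c == 1) = [x] := by
            simp only [List.filter, hxf]
          rw [h1]
          congr 1
          refine (List.filter_congr ?_).symm
          intro c hc
          by_cases hcx : c = x
          · subst hcx
            exact absurd hc (List.count_eq_zero.mp hx0)
          · rw [hcnt c]; simp [hcx]
        · intro c
          show c ∈ s.2 ↔ _
          rw [hd c, hcnt c]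
          by_cases hcx : c = x
          · subst hcx; simp [hx0]
          · simp [hcx]

-- ===== VERDICT (by name: the statement is the Claim_ definition above) =====
theorem findLastChar_spec : Claim_equal_findLastChar := by
  intro str _
  show findLastChar str = findLastChar_alt str
  unfold findLastChar findLastChar_alt
  rw [scanA_eq_head_filter]
  rw [List.filter_reverse, List.head?_reverse]
  rw [(foldB_inv str.toList).1]
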